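-- pv_equiv track=rewrite | github.com/AngelicaDiazB14/CLASESP. | clase 1 intro.py | sumarDigitosPares_aux
-- ===== SOURCE A (Python) =====
-- def sumarDigitosPares_aux(n):
--     if(n == 0):
--         return 0
--     else:
--         if((n%2) == 0):
--             return (n%10) + sumarDigitosPares_aux(n // 10)  # n%10 obtengo el úñtimo dígito del número, n//10 quita el último dígito del número
--         else:
--             return sumarDigitosPares_aux(n // 10)
-- ===== SOURCE B (Python) =====
-- def sumarDigitosPares_aux(n):
--     digits = []
--     while n != 0:
--         digits.append(n % 10)
--         n //= 10
--     return sum(d for d in digits if d % 2 == 0)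
-- ===== Notes on version B (the rewrite author's own statement) =====
-- stated objective: alternative
-- what changed: Replaced the single recursive descent that tests parity of the remaining number at each step with two staged passes: an iterative loop that first extracts the full digit list, then a filter-and-sum over the even digits (correct since n and its last digit have the same parity for n >= 0).
-- outside the precondition, e.g. on sumarDigitosPares_aux(-4): A raises RecursionError, B does not finish within the time limit
import Mathlib
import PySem

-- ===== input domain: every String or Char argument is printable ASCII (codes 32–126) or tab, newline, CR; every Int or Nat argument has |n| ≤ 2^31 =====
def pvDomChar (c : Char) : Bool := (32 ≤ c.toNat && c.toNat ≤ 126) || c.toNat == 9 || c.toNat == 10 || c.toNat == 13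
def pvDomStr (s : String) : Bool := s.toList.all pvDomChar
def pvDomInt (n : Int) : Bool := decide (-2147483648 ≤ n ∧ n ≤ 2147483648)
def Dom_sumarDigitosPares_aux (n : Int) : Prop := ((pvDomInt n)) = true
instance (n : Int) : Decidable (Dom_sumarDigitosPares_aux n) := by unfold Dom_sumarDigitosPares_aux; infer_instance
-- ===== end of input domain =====

-- B splits A's one recursive pass into two staged passes: extract the digit list, then filter-and-sum
-- the even digits (same value for n ≥ 0 because n and its last digit share parity).
-- Both Pythons fail to terminate normally on negative n (A hits the recursion limit), hence Pre_ below.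

-- ===== PORT A =====
-- A's recursion is not well-founded on negative Int, so the port carries a fuel
-- parameter; the wrapper supplies fuel n.toNat + 1, enough for every n ≥ 0 (= Pre_).
def sumarDigitosPares_auxGo : Nat → Int → Int
  | 0, _ => 0
  | fuel + 1, n =>
    if n = 0 then 0
    else if PySem.Int.mod n 2 = 0 then
      PySem.Int.mod n 10 + sumarDigitosPares_auxGo fuel (PySem.Int.floordiv n 10)
    else
      sumarDigitosPares_auxGo fuel (PySem.Int.floordiv n 10)

def sumarDigitosPares_aux (n : Int) : Int := sumarDigitosPares_auxGo (n.toNat + 1) n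

-- ===== PORT B =====
-- pass 1: while n != 0: digits.append(n % 10); n //= 10 — fuel for the same reason as A.
def pvAltDigitsGo : Nat → Int → List Int → List Int
  | 0, _, ds => ds
  | fuel + 1, n, ds =>
    if n = 0 then ds
    else pvAltDigitsGo fuel (PySem.Int.floordiv n 10) (ds ++ [PySem.Int.mod n 10])

-- pass 2: sum(d for d in digits if d % 2 == 0)
def sumarDigitosPares_aux_alt (n : Int) : Int :=
  ((pvAltDigitsGo (n.toNat + 1) n []).filter
      (fun d => PySem.Int.mod d 2 == 0)).foldl (· + ·) 0

-- ===== PRECONDITION & SPEC =====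
-- Pre_ excludes negative n: there both Pythons never return (A raises RecursionError, B loops forever).
def Pre_sumarDigitosPares_aux (n : Int) : Prop := 0 ≤ n
instance (n : Int) : Decidable (Pre_sumarDigitosPares_aux n) := by unfold Pre_sumarDigitosPares_aux; infer_instance
def pvWitness_sumarDigitosPares_aux : Int := 2468

def Spec_sumarDigitosPares_aux (n : Int) (out : Int) : Prop := out = sumarDigitosPares_aux_alt n
instance (n : Int) (out : Int) : Decidable (Spec_sumarDigitosPares_aux n out) := by unfold Spec_sumarDigitosPares_aux; infer_instance

-- ===== CLAIM (what is proved, stated in full; the proofs are below) =====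
def Claim_equal_sumarDigitosPares_aux : Prop := ∀ (n : Int), Dom_sumarDigitosPares_aux n → Pre_sumarDigitosPares_aux n → Spec_sumarDigitosPares_aux n (sumarDigitosPares_aux n)

-- ===== LEMMAS AND PROOFS =====

theorem pv_floordiv_lt (n : Int) (hn : 0 < n) :
    (PySem.Int.floordiv n 10).toNat < n.toNat ∧ 0 ≤ PySem.Int.floordiv n 10 := by
  have h1 : PySem.Int.floordiv n 10 < n :=
    (PySem.Int.floordiv_lt_iff_lt_mul (by norm_num)).2 (by nlinarith)
  have h2 : 0 ≤ PySem.Int.floordiv n 10 :=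
    (PySem.Int.le_floordiv_iff_mul_le (by norm_num)).2 (by omega)
  omega

-- the accumulator of pass 1 only grows on the right
theorem pv_digitsGo_acc (fuel : Nat) (n : Int) (ds : List Int) :
    pvAltDigitsGo fuel n ds = ds ++ pvAltDigitsGo fuel n [] := by
  induction fuel generalizing n ds with
  | zero => simp [pvAltDigitsGo]
  | succ f ih =>
    by_cases h0 : n = 0
    · simp [pvAltDigitsGo, h0]
    · rw [pvAltDigitsGo, pvAltDigitsGo]
      simp only [h0, if_false]
      simp only [List.nil_append]
      rw [ih (PySem.Int.floordiv n 10) (ds ++ [PySem.Int.mod n 10]),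
          ih (PySem.Int.floordiv n 10) ([PySem.Int.mod n 10])]
      simp

theorem pv_foldl_add_shift (l : List Int) (a : Int) :
    l.foldl (· + ·) a = a + l.foldl (· + ·) 0 := by
  induction l generalizing a with
  | nil => simp
  | cons x xs ih =>
    simp only [List.foldl_cons]
    rw [ih (a + x), ih (0 + x)]
    ring

-- n and its last digit share parity (10 is even)
theorem pv_parity (n : Int) :
    (PySem.Int.mod (PySem.Int.mod n 10) 2 = 0) ↔ (PySem.Int.mod n 2 = 0) := by
  rw [PySem.Int.mod_eq_emod_of_pos (by norm_num : (0:Int) < 10),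
      PySem.Int.mod_eq_emod_of_pos (by norm_num : (0:Int) < 2),
      PySem.Int.mod_eq_emod_of_pos (by norm_num : (0:Int) < 2)]
  omega

-- pass 1 + pass 2 of B compute A's recursion
theorem pv_main (fuel : Nat) (n : Int) (hn : 0 ≤ n) (hf : n.toNat < fuel) :
    ((pvAltDigitsGo fuel n []).filter (fun d => PySem.Int.mod d 2 == 0)).foldl (· + ·) 0
      = sumarDigitosPares_auxGo fuel n := by
  induction fuel generalizing n with
  | zero => omega
  | succ f ih =>
    by_cases h0 : n = 0
    · simp [pvAltDigitsGo, sumarDigitosPares_auxGo, h0]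
    · have hpos : 0 < n := lt_of_le_of_ne hn (Ne.symm h0)
      obtain ⟨hlt, hge⟩ := pv_floordiv_lt n hpos
      rw [pvAltDigitsGo, sumarDigitosPares_auxGo]
      simp only [h0, if_false]
      rw [pv_digitsGo_acc, List.nil_append, List.singleton_append, List.filter_cons]
      have hpar := pv_parity n
      simp only [beq_iff_eq]
      by_cases hev : PySem.Int.mod n 2 = 0
      · rw [if_pos (hpar.2 hev), if_pos hev, List.foldl_cons]
        rw [pv_foldl_add_shift, ih _ hge (by omega)]
        ring
      · rw [if_neg (fun h => hev (hpar.1 h)), if_neg hev]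
        exact ih _ hge (by omega)

-- ===== VERDICT (by name: the statement is the Claim_ definition above) =====
theorem sumarDigitosPares_aux_spec : Claim_equal_sumarDigitosPares_aux := by
  intro n _ hpre
  unfold Spec_sumarDigitosPares_aux sumarDigitosPares_aux sumarDigitosPares_aux_alt
  rw [pv_main (n.toNat + 1) n hpre (by omega)]
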